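-- pv_equiv track=rewrite | github.com/StephenOC12/DSA_Solutions | CommonSubstringQ.py | get_common_substring
-- ===== SOURCE A (Python) =====
-- _multiplier = 263
--
-- _prime = 1000000007
--
-- def hash_func(hashes, start, length):
-- 	y = pow(_multiplier, length, _prime)
-- 	hash_value = (hashes[start + length] - y * hashes[start]) % _prime
-- 	return hash_value
--
-- def get_common_substring(s_hashes, t_hashes, length):
-- 	hash_dict = {}
-- 	for i in range(len(s_hashes) - length):
-- 		hash_value = hash_func(s_hashes, i, length)
-- 		if hash_value not in hash_dict:
-- 			hash_dict[hash_value] = i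
-- 	for j in range(len(t_hashes) - length):
-- 		hash_value = hash_func(t_hashes, j, length)
-- 		if hash_value in hash_dict:
-- 			return hash_dict[hash_value], j
-- 	return -1, -1
-- ===== SOURCE B (Python) =====
-- _multiplier = 263
--
-- _prime = 1000000007
--
-- def hash_func(hashes, start, length):
-- 	y = pow(_multiplier, length, _prime)
-- 	hash_value = (hashes[start + length] - y * hashes[start]) % _prime
-- 	return hash_value
--
-- def get_common_substring(s_hashes, t_hashes, length):
-- 	# No hash table: scan t's positions in order; for each, scan s's
-- 	# positions in order and return the first matching pair.
-- 	for j in range(len(t_hashes) - length):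
-- 		t_hash = hash_func(t_hashes, j, length)
-- 		for i in range(len(s_hashes) - length):
-- 			if hash_func(s_hashes, i, length) == t_hash:
-- 				return i, j
-- 	return -1, -1
-- ===== Notes on version B (the rewrite author's own statement) =====
-- stated objective: simpler
-- what changed: Drops the first-seen hash dictionary entirely: B scans t's positions in ascending order and, for each, scans s's positions in ascending order, returning the first matching (i, j) pair directly.
import Mathlib
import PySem

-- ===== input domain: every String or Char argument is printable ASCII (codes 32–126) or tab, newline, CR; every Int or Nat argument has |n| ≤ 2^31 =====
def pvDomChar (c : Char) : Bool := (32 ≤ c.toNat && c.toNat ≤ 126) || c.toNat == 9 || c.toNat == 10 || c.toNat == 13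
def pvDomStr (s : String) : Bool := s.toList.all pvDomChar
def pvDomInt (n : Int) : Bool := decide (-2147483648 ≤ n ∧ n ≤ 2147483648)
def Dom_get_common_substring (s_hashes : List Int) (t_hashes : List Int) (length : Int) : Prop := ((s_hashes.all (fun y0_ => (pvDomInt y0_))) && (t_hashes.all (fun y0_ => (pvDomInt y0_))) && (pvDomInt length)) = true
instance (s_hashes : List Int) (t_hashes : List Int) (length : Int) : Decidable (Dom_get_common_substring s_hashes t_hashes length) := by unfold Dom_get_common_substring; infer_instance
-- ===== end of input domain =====

-- B replaces A's first-seen hash dictionary with two ascending nested scans returning the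
-- first matching pair (objective: simpler, same result).

-- ===== PORT A =====
-- hash_func; pow(263, length, p) = PySem.Int.powMod on length.toNat (exact for 0 ≤ length,
-- which Pre_ guarantees); list indexing via pyGetD (in range under Pre_).
def hash_func (hashes : List Int) (start : Int) (length : Int) : Int :=
  let y := PySem.Int.powMod 263 length.toNat 1000000007
  PySem.Int.mod ((PySem.List.pyGetD hashes (start + length) 0) - y * (PySem.List.pyGetD hashes start 0)) 1000000007

-- second loop of A: first j whose hash is a key of the dict
def gcsLoopT (t_hashes : List Int) (length : Int) (d : PySem.Dict Int Int) : List Int → Int × Int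
  | [] => (-1, -1)
  | j :: js =>
    let hv := hash_func t_hashes j length
    if d.contains hv then ((d.get? hv).getD 0, j) else gcsLoopT t_hashes length d js

def get_common_substring (s_hashes : List Int) (t_hashes : List Int) (length : Int) : Int × Int :=
  let d := (PySem.List.pyRange 0 ((s_hashes.length : Int) - length) 1).foldl
    (fun d i =>
      let hv := hash_func s_hashes i length
      if d.contains hv then d else d.insert hv i) PySem.Dict.empty
  gcsLoopT t_hashes length d (PySem.List.pyRange 0 ((t_hashes.length : Int) - length) 1)

-- ===== PORT B =====
-- inner loop of B: first i (ascending) whose s-hash equals t_hash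
def gcsInner (s_hashes : List Int) (length : Int) (t_hash : Int) : List Int → Option Int
  | [] => none
  | i :: is =>
    if hash_func s_hashes i length == t_hash then some i else gcsInner s_hashes length t_hash is

-- outer loop of B over t's positions
def gcsOuter (s_hashes : List Int) (t_hashes : List Int) (length : Int) : List Int → Int × Int
  | [] => (-1, -1)
  | j :: js =>
    let t_hash := hash_func t_hashes j length
    match gcsInner s_hashes length t_hash (PySem.List.pyRange 0 ((s_hashes.length : Int) - length) 1) with
    | some i => (i, j)
    | none => gcsOuter s_hashes t_hashes length js

def get_common_substring_alt (s_hashes : List Int) (t_hashes : List Int) (length : Int) : Int × Int :=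
  gcsOuter s_hashes t_hashes length (PySem.List.pyRange 0 ((t_hashes.length : Int) - length) 1)

-- ===== PRECONDITION & SPEC =====
-- A raises IndexError whenever length < 0 (the s-loop then walks past the end of s_hashes);
-- Pre_ keeps exactly the inputs on which A returns.
def Pre_get_common_substring (s_hashes : List Int) (t_hashes : List Int) (length : Int) : Prop :=
  0 ≤ length
instance (s_hashes : List Int) (t_hashes : List Int) (length : Int) : Decidable (Pre_get_common_substring s_hashes t_hashes length) := by unfold Pre_get_common_substring; infer_instance

def pvWitness_get_common_substring : List Int × List Int × Int := ([1, 2, 3], [2, 3, 4], 1)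

def Spec_get_common_substring (s_hashes : List Int) (t_hashes : List Int) (length : Int) (out : Int × Int) : Prop := out = get_common_substring_alt s_hashes t_hashes length
instance (s_hashes : List Int) (t_hashes : List Int) (length : Int) (out : Int × Int) : Decidable (Spec_get_common_substring s_hashes t_hashes length out) := by unfold Spec_get_common_substring; infer_instance

-- ===== CLAIM (what is proved, stated in full; the proofs are below) =====
def Claim_equal_get_common_substring : Prop := ∀ (s_hashes : List Int) (t_hashes : List Int) (length : Int), Dom_get_common_substring s_hashes t_hashes length → Pre_get_common_substring s_hashes t_hashes length → Spec_get_common_substring s_hashes t_hashes length (get_common_substring s_hashes t_hashes length)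

-- ===== LEMMAS AND PROOFS =====

-- The dict built by A's first loop (first-seen wins) looks up to the FIRST index in the
-- scanned list whose hash equals the key — exactly List.find?.
theorem gcs_dict_get? (s : List Int) (len v : Int) :
    ∀ (L : List Int) (d : PySem.Dict Int Int),
      (L.foldl (fun d i =>
        let hv := hash_func s i len
        if d.contains hv then d else d.insert hv i) d).get? v =
      match d.get? v with
      | some w => some w
      | none => L.find? (fun i => hash_func s i len == v) := by
  intro L
  induction L with
  | nil => intro d; cases h : d.get? v <;> simp [h]
  | cons i L ih =>
    intro d
    simp only [List.foldl_cons, List.find?_cons]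
    by_cases hc : d.contains (hash_func s i len) = true
    · simp only [hc, if_pos]
      rw [ih d]
      cases h : d.get? v with
      | some w => simp
      | none =>
        by_cases hv : hash_func s i len = v
        · exfalso
          rw [hv, PySem.Dict.contains_eq_isSome_get?, h] at hc
          simp at hc
        · have hbe : (hash_func s i len == v) = false := by
            simp only [beq_eq_false_iff_ne, ne_eq]; exact hv
          simp [hbe]
    · simp only [hc, if_neg, Bool.false_eq_true, not_false_eq_true]
      rw [ih, PySem.Dict.get?_insert]
      have h0 : d.get? (hash_func s i len) = none := by
        rw [PySem.Dict.contains_eq_isSome_get?] at hc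
        cases h : d.get? (hash_func s i len) <;> simp [h] at hc ⊢
      by_cases hv : v = hash_func s i len
      · subst hv; simp [h0]
      · have hbe : (hash_func s i len == v) = false := by
          simp only [beq_eq_false_iff_ne, ne_eq]
          exact fun e => hv e.symm
        simp [hv, hbe]

-- B's inner loop IS List.find?
theorem gcsInner_eq_find? (s : List Int) (len hv : Int) (L : List Int) :
    gcsInner s len hv L = L.find? (fun i => hash_func s i len == hv) := by
  induction L with
  | nil => rfl
  | cons i L ih =>
    cases hb : hash_func s i len == hv <;> simp [gcsInner, hb, ih]

-- the two second loops agree for the empty-start dict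
theorem gcs_loops_agree (s t : List Int) (len : Int) :
    ∀ (J : List Int),
      gcsLoopT t len ((PySem.List.pyRange 0 ((s.length : Int) - len) 1).foldl
        (fun d i =>
          let hv := hash_func s i len
          if d.contains hv then d else d.insert hv i) PySem.Dict.empty) J =
      gcsOuter s t len J := by
  intro J
  induction J with
  | nil => rfl
  | cons j J ih =>
    simp only [gcsLoopT, gcsOuter]
    rw [gcsInner_eq_find?]
    have hget := gcs_dict_get? s len (hash_func t j len)
      (PySem.List.pyRange 0 ((s.length : Int) - len) 1) PySem.Dict.empty
    simp only [PySem.Dict.get?_empty] at hget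
    rw [PySem.Dict.contains_eq_isSome_get?, hget]
    cases hf : (PySem.List.pyRange 0 ((s.length : Int) - len) 1).find?
        (fun i => hash_func s i len == hash_func t j len) with
    | none => simpa [hf] using ih
    | some i => simp

-- ===== VERDICT (by name: the statement is the Claim_ definition above) =====
theorem get_common_substring_spec : Claim_equal_get_common_substring := by
  intro s t len _ _
  unfold Spec_get_common_substring get_common_substring get_common_substring_alt
  exact gcs_loops_agree s t len _
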